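-- pv_equiv track=rewrite | github.com/duythong244/Baitap04 | 5.4.py | generate_expressions
-- ===== SOURCE A (Python) =====
-- from itertools import combinations
--
-- def generate_expressions(expression, pairs):
--     """Generate all valid expressions by removing pairs of parentheses."""
--     all_expressions = set()
--
--     # Try removing at least one pair up to all pairs
--     for r in range(1, len(pairs) + 1):
--         for pair_combination in combinations(pairs, r):
--             to_remove = set()
--             for start, end in pair_combination:
--                 to_remove.add(start)
--                 to_remove.add(end)
--
--             # Build the new expression by skipping indices in to_remove
--             new_expression = ''.join(
--                 char for idx, char in enumerate(expression) if idx not in to_remove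
--             )
--             all_expressions.add(new_expression)
--
--     return sorted(all_expressions)
-- ===== SOURCE B (Python) =====
-- def generate_expressions(expression, pairs):
--     """Generate all valid expressions by removing pairs of parentheses."""
--     result = set()
--
--     def walk(i, removed, any_chosen):
--         if i == len(pairs):
--             if any_chosen:
--                 result.add(''.join(
--                     c for idx, c in enumerate(expression) if idx not in removed
--                 ))
--             return
--         walk(i + 1, removed, any_chosen)                  # exclude pairs[i]
--         s, e = pairs[i]
--         walk(i + 1, removed | {s, e}, True)               # include pairs[i]
--
--     walk(0, set(), False)
--     return sorted(result)
-- ===== Notes on version B (the rewrite author's own statement) =====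
-- stated objective: alternative
-- what changed: Replaces the size-by-size itertools.combinations enumeration (rebuilding a removal set per subset) with a binary include/exclude recursion over the pair list that threads the removal set along the path and skips only the all-excluded leaf.
import Mathlib
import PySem

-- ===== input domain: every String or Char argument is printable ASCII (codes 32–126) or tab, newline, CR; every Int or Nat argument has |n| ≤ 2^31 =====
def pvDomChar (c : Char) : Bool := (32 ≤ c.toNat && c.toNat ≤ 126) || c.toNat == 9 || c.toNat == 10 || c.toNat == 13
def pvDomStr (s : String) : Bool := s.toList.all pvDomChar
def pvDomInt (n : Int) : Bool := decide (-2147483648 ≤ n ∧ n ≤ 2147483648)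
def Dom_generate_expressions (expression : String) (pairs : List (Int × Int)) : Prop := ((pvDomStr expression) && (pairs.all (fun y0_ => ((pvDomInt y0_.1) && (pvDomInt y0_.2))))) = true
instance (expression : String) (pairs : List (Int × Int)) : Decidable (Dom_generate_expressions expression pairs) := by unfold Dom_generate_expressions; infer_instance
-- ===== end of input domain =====

-- B replaces A's size-by-size combinations enumeration with a binary include/exclude
-- recursion over the pair list (alternative decomposition; same exponential cost).

-- ===== PORT A =====
-- loop body of A: build to_remove from one pair combination, then join the kept chars
def pvNewExprA (chars : List Char) (pair_combination : List (Int × Int)) : String :=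
  let to_remove : PySem.Set Int :=
    pair_combination.foldl (fun s p => (s.add p.1).add p.2) PySem.Set.empty
  String.ofList (((PySem.List.enumerate chars 0).filter
    (fun q => !(to_remove.contains q.1))).map (fun q => q.2))

def generate_expressions (expression : String) (pairs : List (Int × Int)) : List String :=
  let all_expressions : PySem.Set String :=
    (PySem.List.pyRange 1 ((pairs.length : Int) + 1) 1).foldl (fun acc r =>
      (PySem.List.combinations pairs r.toNat).foldl (fun acc2 pair_combination =>
        acc2.add (pvNewExprA expression.toList pair_combination)) acc)
      PySem.Set.empty
  PySem.List.sorted all_expressions (fun x => x)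

-- ===== PORT B =====
def pvBuild (chars : List Char) (removed : PySem.Set Int) : String :=
  String.ofList (((PySem.List.enumerate chars 0).filter
    (fun q => !(removed.contains q.1))).map (fun q => q.2))

def pvWalk (chars : List Char) (rest : List (Int × Int)) (removed : PySem.Set Int)
    (anyChosen : Bool) (acc : PySem.Set String) : PySem.Set String :=
  match rest with
  | [] => if anyChosen then acc.add (pvBuild chars removed) else acc
  | (s, e) :: tl =>
      let acc1 := pvWalk chars tl removed anyChosen acc
      pvWalk chars tl (removed.union (PySem.Set.ofList [s, e])) true acc1

def generate_expressions_alt (expression : String) (pairs : List (Int × Int)) : List String :=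
  PySem.List.sorted (pvWalk expression.toList pairs PySem.Set.empty false PySem.Set.empty)
    (fun x => x)

-- ===== PRECONDITION & SPEC =====
def Spec_generate_expressions (expression : String) (pairs : List (Int × Int)) (out : List String) : Prop := out = generate_expressions_alt expression pairs
instance (expression : String) (pairs : List (Int × Int)) (out : List String) : Decidable (Spec_generate_expressions expression pairs out) := by unfold Spec_generate_expressions; infer_instance

-- ===== CLAIM (what is proved, stated in full; the proofs are below) =====
def Claim_equal_generate_expressions : Prop := ∀ (expression : String) (pairs : List (Int × Int)), Dom_generate_expressions expression pairs → Spec_generate_expressions expression pairs (generate_expressions expression pairs)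

-- ===== LEMMAS AND PROOFS =====

-- the canonical image of a choice of pairs: drop indices that are an endpoint of a chosen pair
def pvEndpts (c : List (Int × Int)) (i : Int) : Bool := c.any (fun p => i == p.1 || i == p.2)

def pvImg (chars : List Char) (P : Int → Bool) : String :=
  String.ofList (((PySem.List.enumerate chars 0).filter (fun q => !(P q.1))).map (fun q => q.2))

theorem pvImg_congr (chars : List Char) (P Q : Int → Bool) (h : ∀ i, P i = Q i) :
    pvImg chars P = pvImg chars Q := by
  unfold pvImg
  rw [List.filter_congr (fun q _ => by rw [h q.1])]

theorem pvRemove_mem (comb : List (Int × Int)) (s0 : PySem.Set Int) (x : Int) :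
    x ∈ comb.foldl (fun s p => (s.add p.1).add p.2) s0 ↔
      x ∈ s0 ∨ ∃ p ∈ comb, x = p.1 ∨ x = p.2 := by
  induction comb generalizing s0 with
  | nil => simp
  | cons p tl ih =>
      simp only [List.foldl_cons, ih, PySem.Set.mem_add, List.mem_cons]
      constructor
      · rintro (((h | h) | h) | ⟨q, hq, h⟩)
        · exact Or.inl h
        · exact Or.inr ⟨p, Or.inl rfl, Or.inl h⟩
        · exact Or.inr ⟨p, Or.inl rfl, Or.inr h⟩
        · exact Or.inr ⟨q, Or.inr hq, h⟩
      · rintro (h | ⟨q, (rfl | hq), h⟩)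
        · exact Or.inl (Or.inl (Or.inl h))
        · rcases h with h | h
          · exact Or.inl (Or.inl (Or.inr h))
          · exact Or.inl (Or.inr h)
        · exact Or.inr ⟨q, hq, h⟩

theorem pvNewExprA_eq (chars : List Char) (comb : List (Int × Int)) :
    pvNewExprA chars comb = pvImg chars (pvEndpts comb) := by
  unfold pvNewExprA pvImg
  rw [List.filter_congr]
  intro q _
  congr 1
  rw [Bool.eq_iff_iff]
  simp only [PySem.Set.contains_iff, pvRemove_mem, pvEndpts, List.any_eq_true,
    Bool.or_eq_true, beq_iff_eq, PySem.Set.empty, List.not_mem_nil, false_or]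

-- membership in A's accumulated set
theorem memA (chars : List Char) (pairs : List (Int × Int)) (x : String) :
    x ∈ (PySem.List.pyRange 1 ((pairs.length : Int) + 1) 1).foldl (fun acc r =>
        (PySem.List.combinations pairs r.toNat).foldl (fun acc2 comb =>
          acc2.add (pvNewExprA chars comb)) acc) PySem.Set.empty ↔
      ∃ c, c.Sublist pairs ∧ c ≠ [] ∧ x = pvImg chars (pvEndpts c) := by
  have outer : ∀ (rs : List Int) (acc : PySem.Set String),
      x ∈ rs.foldl (fun acc r =>
        (PySem.List.combinations pairs r.toNat).foldl (fun acc2 comb =>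
          acc2.add (pvNewExprA chars comb)) acc) acc ↔
      x ∈ acc ∨ ∃ r ∈ rs, ∃ c ∈ PySem.List.combinations pairs r.toNat,
        x = pvNewExprA chars c := by
    intro rs
    induction rs with
    | nil => simp
    | cons r tl ih =>
        intro acc
        simp only [List.foldl_cons, ih, PySem.Set.mem_foldl_add, List.mem_cons]
        constructor
        · rintro ((h | h) | ⟨r', hr', h⟩)
          · exact Or.inl h
          · exact Or.inr ⟨r, Or.inl rfl, h⟩
          · exact Or.inr ⟨r', Or.inr hr', h⟩
        · rintro (h | ⟨r', (rfl | hr'), h⟩)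
          · exact Or.inl (Or.inl h)
          · exact Or.inl (Or.inr h)
          · exact Or.inr ⟨r', hr', h⟩
  rw [outer]
  simp only [PySem.Set.empty, List.not_mem_nil, false_or, PySem.List.mem_pyRange_one,
    PySem.List.mem_combinations_iff]
  constructor
  · rintro ⟨r, ⟨hr1, hr2⟩, c, ⟨hsub, hlen⟩, rfl⟩
    refine ⟨c, hsub, ?_, (pvNewExprA_eq chars c).symm ▸ rfl⟩
    intro hnil
    subst hnil
    simp at hlen
    omega
  · rintro ⟨c, hsub, hne, rfl⟩
    have hlen : 1 ≤ c.length := by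
      cases c with
      | nil => exact absurd rfl hne
      | cons a b => simp
    have hle : c.length ≤ pairs.length := hsub.length_le
    refine ⟨(c.length : Int), ⟨by exact_mod_cast hlen, by omega⟩, c, ⟨hsub, by simp⟩, ?_⟩
    rw [pvNewExprA_eq]

-- the filter predicate after including pair (s,e)
theorem pred_union (removed : PySem.Set Int) (s e : Int) (c : List (Int × Int)) (i : Int) :
    ((removed.union (PySem.Set.ofList [s, e])).contains i || pvEndpts c i) =
      (removed.contains i || pvEndpts ((s, e) :: c) i) := by
  rw [Bool.eq_iff_iff]
  simp only [Bool.or_eq_true, PySem.Set.contains_iff, PySem.Set.mem_union,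
    PySem.Set.mem_ofList, List.mem_cons, List.not_mem_nil, or_false,
    pvEndpts, List.any_cons, List.any_eq_true, Bool.or_eq_true, beq_iff_eq]
  exact or_assoc

-- membership in B's accumulated set
theorem memWalk (chars : List Char) (rest : List (Int × Int)) :
    ∀ (removed : PySem.Set Int) (anyChosen : Bool) (acc : PySem.Set String) (x : String),
      x ∈ pvWalk chars rest removed anyChosen acc ↔
        x ∈ acc ∨ ∃ c, c.Sublist rest ∧ (anyChosen = true ∨ c ≠ []) ∧
          x = pvImg chars (fun i => removed.contains i || pvEndpts c i) := by
  induction rest with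
  | nil =>
      intro removed anyChosen acc x
      have hb : pvBuild chars removed =
          pvImg chars (fun i => removed.contains i || pvEndpts [] i) := by
        unfold pvBuild
        rw [show pvImg chars (fun i => removed.contains i || pvEndpts [] i) =
            pvImg chars (fun i => removed.contains i) from
          pvImg_congr _ _ _ (fun i => by simp [pvEndpts])]
        rfl
      cases anyChosen with
      | false =>
          show x ∈ acc ↔ _
          constructor
          · exact Or.inl
          · rintro (h | ⟨c, hc, (h | hne), _⟩)
            · exact h
            · exact absurd h (by simp)
            · exact absurd (List.sublist_nil.mp hc) hne
      | true =>
          show x ∈ acc.add (pvBuild chars removed) ↔ _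
          rw [PySem.Set.mem_add]
          constructor
          · rintro (h | h)
            · exact Or.inl h
            · subst h
              exact Or.inr ⟨[], List.Sublist.refl _, Or.inl rfl, hb⟩
          · rintro (h | ⟨c, hc, _, rfl⟩)
            · exact Or.inl h
            · have : c = [] := List.sublist_nil.mp hc
              subst this
              exact Or.inr hb.symm
  | cons p tl ih =>
      obtain ⟨s, e⟩ := p
      intro removed anyChosen acc x
      show x ∈ pvWalk chars tl (removed.union (PySem.Set.ofList [s, e])) true
            (pvWalk chars tl removed anyChosen acc) ↔ _
      rw [ih, ih]
      constructor
      · rintro ((h | ⟨c, hc, hcond, rfl⟩) | ⟨c, hc, _, rfl⟩)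
        · exact Or.inl h
        · exact Or.inr ⟨c, hc.trans (List.sublist_cons_self _ _), hcond, rfl⟩
        · refine Or.inr ⟨(s, e) :: c, List.cons_sublist_cons.mpr hc, Or.inr (by simp), ?_⟩
          exact pvImg_congr chars _ _ (pred_union removed s e c)
      · rintro (h | ⟨c, hc, hcond, rfl⟩)
        · exact Or.inl (Or.inl h)
        · rcases List.sublist_cons_iff.mp hc with hc' | ⟨c', rfl, hc'⟩
          · exact Or.inl (Or.inr ⟨c, hc', hcond, rfl⟩)
          · refine Or.inr ⟨c', hc', Or.inl rfl, ?_⟩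
            exact (pvImg_congr chars _ _ (pred_union removed s e c')).symm
-- nodup of the accumulated sets
theorem nodup_foldl_add {α β : Type} [BEq α] [LawfulBEq α] (l : List β) (f : β → α)
    (acc : PySem.Set α) (h : acc.Nodup) :
    (l.foldl (fun a b => a.add (f b)) acc).Nodup := by
  induction l generalizing acc with
  | nil => exact h
  | cons b tl ih => exact ih _ (PySem.Set.nodup_add _ _ h)

theorem nodupA (chars : List Char) (pairs : List (Int × Int)) :
    ((PySem.List.pyRange 1 ((pairs.length : Int) + 1) 1).foldl (fun acc r =>
        (PySem.List.combinations pairs r.toNat).foldl (fun acc2 comb =>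
          acc2.add (pvNewExprA chars comb)) acc) PySem.Set.empty).Nodup := by
  have gen : ∀ (rs : List Int) (acc : PySem.Set String), acc.Nodup →
      (rs.foldl (fun acc r =>
        (PySem.List.combinations pairs r.toNat).foldl (fun acc2 comb =>
          acc2.add (pvNewExprA chars comb)) acc) acc).Nodup := by
    intro rs
    induction rs with
    | nil => exact fun _ h => h
    | cons r tl ih => exact fun acc h => ih _ (nodup_foldl_add _ _ _ h)
  exact gen _ _ List.nodup_nil

theorem nodupWalk (chars : List Char) (rest : List (Int × Int)) :
    ∀ (removed : PySem.Set Int) (anyChosen : Bool) (acc : PySem.Set String),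
      acc.Nodup → (pvWalk chars rest removed anyChosen acc).Nodup := by
  induction rest with
  | nil =>
      intro removed anyChosen acc h
      cases anyChosen with
      | false => simpa [pvWalk] using h
      | true => simpa [pvWalk] using PySem.Set.nodup_add _ _ h
  | cons p tl ih =>
      obtain ⟨s, e⟩ := p
      intro removed anyChosen acc h
      exact ih _ _ _ (ih _ _ _ h)

-- ===== VERDICT (by name: the statement is the Claim_ definition above) =====
theorem generate_expressions_spec : Claim_equal_generate_expressions := by
  intro expression pairs _
  unfold Spec_generate_expressions generate_expressions generate_expressions_alt
  apply PySem.List.sorted_eq_sorted_of_perm _ _ _ (fun a b h => h)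
  apply (List.perm_ext_iff_of_nodup (nodupA _ _) (nodupWalk _ _ _ _ _ List.nodup_nil)).mpr
  intro x
  rw [memA, memWalk]
  simp only [PySem.Set.empty, List.not_mem_nil, false_or]
  constructor
  · rintro ⟨c, hc, hne, rfl⟩
    refine ⟨c, hc, Or.inr hne, ?_⟩
    exact pvImg_congr _ _ _ (fun i => by
      simp)
  · rintro ⟨c, hc, hcond, rfl⟩
    rcases hcond with h | hne
    · exact absurd h (by simp)
    · refine ⟨c, hc, hne, ?_⟩
      exact pvImg_congr _ _ _ (fun i => by
        simp)
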